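-- pv_equiv track=rewrite | github.com/openKG-field/kgbook-2020 | chapter3/3.2.4_languageModels/ngram_word.py | ngram
-- ===== SOURCE A (Python) =====
-- def ngram(typeWord, compareWord, n):
--     if not type(typeWord) == str or not type(compareWord) == str:
--         return -1
--     ngram_value = 0
--     intersection_value = 0
--     tlength = len(typeWord)
--     clength = len(compareWord)
--     tMap = {'start': 0}
--     tlist = list()
--     clist = list()
--     combineT = 0
--     combineC = 0
--     # combine the each leaf of typeword and save them into a map for the next comparison
--     for i in range(tlength // n):
--         currentT = typeWord[i * n:(i + 1) * n]
--         tlist.append(currentT)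
--     for i in range(len(tlist)):
--         if i + 1 < len(tlist):
--             temT = tlist[i] + tlist[i + 1]
--             combineT = combineT + 1
--             tMap[temT] = 1
--     for i in range(clength // n):
--         currentC = compareWord[i * n:(i + 1) * n]
--         clist.append(currentC)
--     for i in range(len(clist)):
--         if i + 1 < len(clist):
--             combineC = combineC + 1
--             temC = clist[i] + clist[i + 1]
--             if temC in tMap:
--                 intersection_value = intersection_value + 1
--     ngram_value = combineC + combineT - 2 * intersection_value
--     return ngram_value
-- ===== SOURCE B (Python) =====
-- def ngram(typeWord, compareWord, n):
--     if not type(typeWord) == str or not type(compareWord) == str: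
--         return -1
--     def bigrams(s):
--         blocks = len(s) // n
--         return sorted(s[i * n:(i + 2) * n] for i in range(max(blocks - 1, 0)))
--     tb = bigrams(typeWord)
--     cb = bigrams(compareWord)
--     i = 0
--     inter = 0
--     for x in cb:
--         while i < len(tb) and tb[i] < x:
--             i += 1
--         if i < len(tb) and tb[i] == x:
--             inter += 1
--     return len(cb) + len(tb) - 2 * inter
-- ===== Notes on version B (the rewrite author's own statement) =====
-- stated objective: alternative
-- what changed: Replaces A's dict of type bigrams probed inside the compare loop by sorting both bigram lists and counting the intersection with a single two-pointer merge scan over the sorted lists (block counts come from len//n arithmetic instead of A's staged list-building loops).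
import Mathlib
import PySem

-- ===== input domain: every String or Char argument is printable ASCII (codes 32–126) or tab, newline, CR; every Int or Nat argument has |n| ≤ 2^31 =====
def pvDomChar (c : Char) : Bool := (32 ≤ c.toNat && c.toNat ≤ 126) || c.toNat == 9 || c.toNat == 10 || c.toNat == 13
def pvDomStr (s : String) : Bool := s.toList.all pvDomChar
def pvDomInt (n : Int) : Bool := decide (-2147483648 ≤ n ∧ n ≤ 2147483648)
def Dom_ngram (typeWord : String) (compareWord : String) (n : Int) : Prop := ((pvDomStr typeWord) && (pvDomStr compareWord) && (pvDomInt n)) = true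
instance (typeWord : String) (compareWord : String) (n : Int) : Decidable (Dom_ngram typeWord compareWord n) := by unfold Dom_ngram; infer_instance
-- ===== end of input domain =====

-- B sorts both bigram lists and counts the intersection with a single two-pointer merge scan
-- instead of A's dict of type bigrams probed inside the compare loop (objective: alternative).

-- ===== PORT A =====
-- literal transliteration of A; the two `type(...) == str` guards are always true under the
-- String type convention, so the `return -1` branch is unreachable and not modelled
def ngram (typeWord : String) (compareWord : String) (n : Int) : Int :=
  let tl := typeWord.toList
  let cl := compareWord.toList
  let tlength : Int := tl.length
  let clength : Int := cl.length
  let tMap0 : PySem.Dict (List Char) Int := PySem.Dict.ofList [("start".toList, 0)]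
  let tlist : List (List Char) :=
    (PySem.List.pyRange 0 (PySem.Int.floordiv tlength n) 1).foldl
      (fun acc i => acc ++ [PySem.List.slice tl (some (i * n)) (some ((i + 1) * n))]) []
  let st :=
    (PySem.List.pyRange 0 (tlist.length : Int) 1).foldl
      (fun (st : Int × PySem.Dict (List Char) Int) i =>
        if i + 1 < (tlist.length : Int) then
          (st.1 + 1,
           st.2.insert (PySem.List.pyGetD tlist i [] ++ PySem.List.pyGetD tlist (i + 1) []) 1)
        else st) (0, tMap0)
  let combineT := st.1
  let tMap := st.2
  let clist : List (List Char) :=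
    (PySem.List.pyRange 0 (PySem.Int.floordiv clength n) 1).foldl
      (fun acc i => acc ++ [PySem.List.slice cl (some (i * n)) (some ((i + 1) * n))]) []
  let st2 :=
    (PySem.List.pyRange 0 (clist.length : Int) 1).foldl
      (fun (st : Int × Int) i =>
        if i + 1 < (clist.length : Int) then
          (st.1 + 1,
           if tMap.contains (PySem.List.pyGetD clist i [] ++ PySem.List.pyGetD clist (i + 1) []) then
             st.2 + 1
           else st.2)
        else st) (0, 0)
  st2.1 + combineT - 2 * st2.2

-- ===== PORT B =====
-- sorted(...) on Python strings sorts by code points = lexicographic '<' on the char lists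
-- (the LinearOrder instance is pinned so the order lemmas apply; same relation as List.instLT)
def pvSortId (xs : List (List Char)) : List (List Char) :=
  @PySem.List.sorted _ _ List.instLinearOrder.toLT LinearOrder.toDecidableLT xs (fun x => x) false

-- the sorted list of n-block bigrams s[i*n:(i+2)*n] of s (Source B's helper `bigrams`)
def pvBigrams (s : List Char) (n : Int) : List (List Char) :=
  let blocks := PySem.Int.floordiv ((s.length : Int)) n
  pvSortId ((PySem.List.pyRange 0 (max (blocks - 1) 0) 1).map
      (fun i => PySem.List.slice s (some (i * n)) (some ((i + 2) * n))))

-- Source B's inner `while i < len(tb) and tb[i] < x: i += 1`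
def pvSkip (tb : List (List Char)) (x : List Char) (i : Nat) : Nat :=
  if h : i < tb.length then
    if tb[i] < x then pvSkip tb x (i + 1) else i
  else i
termination_by tb.length - i
decreasing_by omega

def ngram_alt (typeWord : String) (compareWord : String) (n : Int) : Int :=
  let tb := pvBigrams typeWord.toList n
  let cb := pvBigrams compareWord.toList n
  let st := cb.foldl (fun (st : Nat × Int) x =>
      let i := pvSkip tb x st.1
      if h : i < tb.length then
        (if tb[i] = x then (i, st.2 + 1) else (i, st.2))
      else (i, st.2)) ((0 : Nat), (0 : Int))
  (cb.length : Int) + (tb.length : Int) - 2 * st.2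

-- ===== PRECONDITION & SPEC =====
-- Pre_ excludes exactly n = 0, where Python A raises ZeroDivisionError on len(typeWord) // n
def Pre_ngram (typeWord : String) (compareWord : String) (n : Int) : Prop := n ≠ 0
instance (typeWord : String) (compareWord : String) (n : Int) : Decidable (Pre_ngram typeWord compareWord n) := by unfold Pre_ngram; infer_instance
def pvWitness_ngram : String × String × Int := ("abcd", "abcf", 1)

def Spec_ngram (typeWord : String) (compareWord : String) (n : Int) (out : Int) : Prop := out = ngram_alt typeWord compareWord n
instance (typeWord : String) (compareWord : String) (n : Int) (out : Int) : Decidable (Spec_ngram typeWord compareWord n out) := by unfold Spec_ngram; infer_instance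

-- ===== CLAIM (what is proved, stated in full; the proofs are below) =====
def Claim_equal_ngram : Prop := ∀ (typeWord : String) (compareWord : String) (n : Int), Dom_ngram typeWord compareWord n → Pre_ngram typeWord compareWord n → Spec_ngram typeWord compareWord n (ngram typeWord compareWord n)

-- ===== LEMMAS AND PROOFS =====

-- proof-side name for A's bigram at block i: the two adjacent block slices concatenated
def pvBig (s : List Char) (n : Int) (i : Int) : List Char :=
  PySem.List.slice s (some (i * n)) (some ((i + 1) * n)) ++
    PySem.List.slice s (some ((i + 1) * n)) (some ((i + 2) * n))

theorem pairLoopGen {σ : Type} (L : Int) (h1 : 1 ≤ L) (upd : σ → Int → σ) (s0 : σ) :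
    (PySem.List.pyRange 0 L 1).foldl
      (fun (st : Int × σ) i => if i + 1 < L then (st.1 + 1, upd st.2 i) else st) (0, s0)
    = (L - 1, (PySem.List.pyRange 0 (L - 1) 1).foldl upd s0) := by
  rw [PySem.List.pyRange_one_append 0 (L - 1) L (by omega) (by omega), List.foldl_append]
  have hfirst :
      (PySem.List.pyRange 0 (L - 1) 1).foldl
        (fun (st : Int × σ) i => if i + 1 < L then (st.1 + 1, upd st.2 i) else st) (0, s0)
      = (PySem.List.pyRange 0 (L - 1) 1).foldl
        (fun (st : Int × σ) i => (st.1 + 1, upd st.2 i)) (0, s0) := by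
    apply PySem.List.foldl_congr_mem
    intro acc i hi
    rw [PySem.List.mem_pyRange_one] at hi
    simp only [if_pos (by omega : i + 1 < L)]
  rw [hfirst]
  rw [PySem.List.foldl_prod_mk (f := fun (a : Int) (_ : Int) => a + 1) (g := upd)]
  have hrange : PySem.List.pyRange (L - 1) L 1 = [L - 1] := by
    have := PySem.List.pyRange_one_singleton (a := L - 1)
    simpa using this
  rw [hrange]
  simp only [List.foldl_cons, List.foldl_nil]
  rw [if_neg (by omega)]
  congr 1
  rw [PySem.List.foldl_add (g := fun _ => (1 : Int)), PySem.List.sum_map_const_int]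
  simp [PySem.List.length_pyRange_one]
  omega

theorem pairLoopNat {σ : Type} (L : Nat) (upd : σ → Int → σ) (s0 : σ) :
    (PySem.List.pyRange 0 (L : Int) 1).foldl
      (fun (st : Int × σ) i => if i + 1 < (L : Int) then (st.1 + 1, upd st.2 i) else st) (0, s0)
    = (((L : Int) - 1) ⊔ 0, (PySem.List.pyRange 0 ((L : Int) - 1) 1).foldl upd s0) := by
  rcases Nat.eq_zero_or_pos L with h | h
  · subst h
    rw [PySem.List.pyRange_one_eq_nil (by omega), PySem.List.pyRange_one_eq_nil (by omega)]
    simp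
  · rw [pairLoopGen (L : Int) (by omega) upd s0]
    congr 1
    omega

theorem pyRangeCongr (a b : Int) (h : a.toNat = b.toNat) :
    PySem.List.pyRange 0 a 1 = PySem.List.pyRange 0 b 1 := by
  rw [PySem.List.pyRange_one, PySem.List.pyRange_one]
  simp [h]

-- length of one full block slice
theorem sliceBlockLen (s : List Char) (a b : Int) (h0 : 0 ≤ a) (hab : a ≤ b)
    (hb : b ≤ (s.length : Int)) :
    ((PySem.List.slice s (some a) (some b)).length : Int) = b - a := by
  rw [PySem.List.slice_toNat _ h0 (by omega)]
  simp [List.length_take, List.length_drop]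
  omega

-- A equals the closed form |CB| + |TB| - 2·(number of compare bigrams present in the type bigrams)
theorem ngram_eq_closed (typeWord compareWord : String) (n : Int) (hn : n ≠ 0) :
    ngram typeWord compareWord n =
      (((PySem.List.pyRange 0 (max (PySem.Int.floordiv ((compareWord.toList.length : Int)) n - 1) 0) 1).map (pvBig compareWord.toList n)).length : Int)
      + (((PySem.List.pyRange 0 (max (PySem.Int.floordiv ((typeWord.toList.length : Int)) n - 1) 0) 1).map (pvBig typeWord.toList n)).length : Int)
      - 2 * (((PySem.List.pyRange 0 (max (PySem.Int.floordiv ((compareWord.toList.length : Int)) n - 1) 0) 1).map (pvBig compareWord.toList n)).countP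
          (fun x => decide (x ∈ (PySem.List.pyRange 0 (max (PySem.Int.floordiv ((typeWord.toList.length : Int)) n - 1) 0) 1).map (pvBig typeWord.toList n))) : Nat) := by
  simp only [ngram]
  rw [PySem.List.foldl_append_singleton_eq_map, PySem.List.foldl_append_singleton_eq_map]
  simp only [List.nil_append]
  simp only [List.length_map, PySem.List.length_pyRange_one, sub_zero]
  set tl := typeWord.toList with htl
  set cl := compareWord.toList with hcl
  set T := PySem.Int.floordiv (↑tl.length) n with hT
  set C := PySem.Int.floordiv (↑cl.length) n with hC
  set ft := fun i : Int => PySem.List.slice tl (some (i * n)) (some ((i + 1) * n)) with hft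
  set fc := fun i : Int => PySem.List.slice cl (some (i * n)) (some ((i + 1) * n)) with hfc
  set tlist := List.map ft (PySem.List.pyRange 0 T 1) with htlist
  set clist := List.map fc (PySem.List.pyRange 0 C 1) with hclist
  rw [pairLoopNat (σ := PySem.Dict (List Char) Int) T.toNat
        (fun d i => d.insert (PySem.List.pyGetD tlist i [] ++ PySem.List.pyGetD tlist (i + 1) []) 1)
        (PySem.Dict.ofList [("start".toList, 0)])]
  dsimp only
  set dmap := List.foldl (fun (d : PySem.Dict (List Char) Int) i =>
      d.insert (PySem.List.pyGetD tlist i [] ++ PySem.List.pyGetD tlist (i + 1) []) 1)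
      (PySem.Dict.ofList [("start".toList, 0)]) (PySem.List.pyRange 0 ((T.toNat : Int) - 1) 1) with hdmap
  rw [pairLoopNat (σ := Int) C.toNat
        (fun a i => if dmap.contains (PySem.List.pyGetD clist i [] ++ PySem.List.pyGetD clist (i + 1) []) = true then a + 1 else a) 0]
  dsimp only
  rw [PySem.List.foldl_if_add_one, zero_add]
  rw [List.countP_map]
  have hTmax : max ((T.toNat : Int) - 1) 0 = max (T - 1) 0 := by omega
  have hCmax : max ((C.toNat : Int) - 1) 0 = max (C - 1) 0 := by omega
  have hrngC : PySem.List.pyRange 0 ((C.toNat : Int) - 1) 1 = PySem.List.pyRange 0 (max (C - 1) 0) 1 :=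
    pyRangeCongr _ _ (by omega)
  rw [hCmax, hTmax, hrngC]
  have hcnt : List.countP
      (fun i => dmap.contains (PySem.List.pyGetD clist i [] ++ PySem.List.pyGetD clist (i + 1) []))
      (PySem.List.pyRange 0 (max (C - 1) 0) 1)
      = List.countP ((fun x => decide (x ∈ List.map (pvBig tl n) (PySem.List.pyRange 0 (max (T - 1) 0) 1))) ∘ pvBig cl n)
        (PySem.List.pyRange 0 (max (C - 1) 0) 1) := by
    apply List.countP_congr
    intro i hi
    rw [PySem.List.mem_pyRange_one] at hi
    obtain ⟨h0i, hiC⟩ := hi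
    have hC2 : 2 ≤ C := by omega
    have hn1 : 1 ≤ n := by
      by_contra h
      have hneg : n ≤ -1 := by omega
      have : C ≤ 0 := by
        rw [hC]
        exact Int.fdiv_nonpos_of_nonneg_of_nonpos (by positivity) (by omega)
      omega
    have hmulC : n * C ≤ (cl.length : Int) := by
      rw [hC]
      exact Int.mul_fdiv_self_le (by omega)
    have hgetc : PySem.List.pyGetD clist i [] ++ PySem.List.pyGetD clist (i + 1) [] = pvBig cl n i := by
      rw [hclist, PySem.List.pyGetD_map_pyRange_of_nonneg fc C i [] (by omega) (by omega),
          PySem.List.pyGetD_map_pyRange_of_nonneg fc C (i + 1) [] (by omega) (by omega)]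
      rw [hfc]
      unfold pvBig
      simp only [show i + 1 + 1 = i + 2 from by omega]
    rw [hgetc]
    have hmapT : List.map (fun j => PySem.List.pyGetD tlist j [] ++ PySem.List.pyGetD tlist (j + 1) [])
        (PySem.List.pyRange 0 ((T.toNat : Int) - 1) 1)
        = List.map (pvBig tl n) (PySem.List.pyRange 0 (max (T - 1) 0) 1) := by
      rw [pyRangeCongr ((T.toNat : Int) - 1) (max (T - 1) 0) (by omega)]
      apply List.map_congr_left
      intro j hj
      rw [PySem.List.mem_pyRange_one] at hj
      have hmulT : n * T ≤ (tl.length : Int) := by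
        rw [hT]
        exact Int.mul_fdiv_self_le (by omega)
      rw [htlist, PySem.List.pyGetD_map_pyRange_of_nonneg ft T j [] (by omega) (by omega),
          PySem.List.pyGetD_map_pyRange_of_nonneg ft T (j + 1) [] (by omega) (by omega)]
      rw [hft]
      unfold pvBig
      simp only [show j + 1 + 1 = j + 2 from by omega]
    have hkeys : dmap.keys = PySem.Set.update (PySem.Dict.ofList [("start".toList, (0 : Int))]).keys
        ((PySem.List.pyRange 0 ((T.toNat : Int) - 1) 1).map
          (fun j => PySem.List.pyGetD tlist j [] ++ PySem.List.pyGetD tlist (j + 1) [])) := by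
      rw [hdmap]
      exact PySem.Dict.keys_foldl_insert_key _ _ _ _
    have hk0 : (PySem.Dict.ofList [("start".toList, (0 : Int))]).keys = ["start".toList] := by rfl
    have hne : pvBig cl n i ≠ "start".toList := by
      intro hcontra
      have hstep1 : i * n ≤ (i + 1) * n := mul_le_mul_of_nonneg_right (by omega) (by omega)
      have hstep2 : (i + 1) * n ≤ (i + 2) * n := mul_le_mul_of_nonneg_right (by omega) (by omega)
      have hub : (i + 2) * n ≤ C * n := mul_le_mul_of_nonneg_right (by omega) (by omega)
      have hlen : C * n ≤ (cl.length : Int) := by rw [mul_comm]; exact hmulC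
      have hlen1 : ((PySem.List.slice cl (some (i * n)) (some ((i + 1) * n))).length : Int) = (i + 1) * n - i * n := by
        apply sliceBlockLen cl _ _ (by positivity) hstep1 (by omega)
      have hlen2 : ((PySem.List.slice cl (some ((i + 1) * n)) (some ((i + 2) * n))).length : Int) = (i + 2) * n - (i + 1) * n := by
        apply sliceBlockLen cl _ _ (by positivity) hstep2 (by omega)
      have hlenb : ((pvBig cl n i).length : Int) = 2 * n := by
        unfold pvBig
        rw [List.length_append]
        push_cast
        rw [hlen1, hlen2]
        ring
      rw [hcontra] at hlenb
      have h5 : "start".toList.length = 5 := by decide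
      rw [h5] at hlenb
      omega
    rw [PySem.Dict.contains_eq_decide_mem_keys, hkeys, hk0, hmapT]
    simp only [Function.comp_apply, decide_eq_true_eq]
    rw [PySem.Set.mem_update]
    simp only [List.mem_singleton]
    constructor
    · rintro (h | h)
      · exact absurd h hne
      · exact h
    · exact fun h => Or.inr h
  rw [hcnt]
  rw [Int.toNat_of_nonneg (le_max_right (C - 1) 0), Int.toNat_of_nonneg (le_max_right (T - 1) 0)]

-- ===== B-side lemmas =====

-- the spec of Source B's while loop
theorem pvSkip_spec (tb : List (List Char)) (x : List Char) (i : Nat) (hi : i ≤ tb.length) :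
    i ≤ pvSkip tb x i ∧ pvSkip tb x i ≤ tb.length ∧
      (∀ j (hj : j < tb.length), i ≤ j → j < pvSkip tb x i → tb[j] < x) ∧
      (∀ (h : pvSkip tb x i < tb.length), ¬ tb[pvSkip tb x i] < x) := by
  fun_induction pvSkip tb x i with
  | case1 i h hlt ih =>
    obtain ⟨ih1, ih2, ih3, ih4⟩ := ih (by omega)
    refine ⟨by omega, ih2, ?_, ih4⟩
    intro j hj hij hjr
    by_cases hji : j = i
    · subst hji; exact hlt
    · exact ih3 j hj (by omega) hjr
  | case2 i h hlt =>
    exact ⟨le_refl _, by omega, fun j hj hij hjr => absurd hjr (by omega), fun _ => hlt⟩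
  | case3 i h =>
    exact ⟨le_refl _, by omega, fun j hj hij hjr => absurd hjr (by omega),
           fun hlt => absurd hlt h⟩

-- the two-pointer merge scan counts exactly the members of tb among cb (both sorted)
theorem merge_fold_count (tb : List (List Char)) (htb : tb.Pairwise (fun a b => ¬ b < a)) :
    ∀ (cb : List (List Char)), cb.Pairwise (fun a b => ¬ b < a) →
      ∀ (i : Nat) (acc : Int), i ≤ tb.length →
      (∀ j (hj : j < tb.length), j < i → ∀ y ∈ cb, tb[j] < y) →
      (cb.foldl (fun (st : Nat × Int) x =>
          let i := pvSkip tb x st.1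
          if h : i < tb.length then
            (if tb[i] = x then (i, st.2 + 1) else (i, st.2))
          else (i, st.2)) (i, acc)).2
        = acc + (cb.countP (fun x => decide (x ∈ tb)) : Int) := by
  intro cb
  induction cb with
  | nil => intro _ i acc _ _; simp
  | cons x rest ih =>
    intro hcb i acc hi hinv
    rw [List.pairwise_cons] at hcb
    obtain ⟨hxr, hrest⟩ := hcb
    obtain ⟨hs1, hs2, hs3, hs4⟩ := pvSkip_spec tb x i hi
    set i' := pvSkip tb x i with hi'
    have hlt_all : ∀ j (hj : j < tb.length), j < i' → tb[j] < x := by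
      intro j hj hji'
      by_cases hji : j < i
      · exact hinv j hj hji x (List.mem_cons_self)
      · exact hs3 j hj (by omega) hji'
    have hmem_iff : x ∈ tb ↔ ∃ (h : i' < tb.length), tb[i'] = x := by
      constructor
      · intro hx
        obtain ⟨k, hk, hkx⟩ := List.mem_iff_getElem.mp hx
        have hki' : ¬ k < i' := fun hcon => absurd hkx (ne_of_lt (hlt_all k hk hcon))
        have hi'len : i' < tb.length := by omega
        refine ⟨hi'len, ?_⟩
        have hle : ¬ tb[k] < tb[i'] := by
          by_cases hki : i' = k
          · subst hki; exact lt_irrefl _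
          · exact (List.pairwise_iff_getElem.mp htb) i' k hi'len hk (by omega)
        rw [hkx] at hle
        rcases lt_trichotomy tb[i'] x with h | h | h
        · exact absurd h (hs4 hi'len)
        · exact h
        · exact absurd h hle
      · rintro ⟨h, hx⟩
        rw [← hx]
        exact List.getElem_mem h
    have hrinv : ∀ j (hj : j < tb.length), j < i' → ∀ y ∈ rest, tb[j] < y := by
      intro j hj hji' y hy
      exact lt_of_lt_of_le (hlt_all j hj hji') (not_lt.mp (hxr y hy))
    simp only [List.foldl_cons]
    by_cases hcase : ∃ (h : i' < tb.length), tb[i'] = x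
    · obtain ⟨hl, hx⟩ := hcase
      rw [dif_pos hl, if_pos hx]
      rw [ih hrest i' (acc + 1) hs2 hrinv]
      rw [List.countP_cons]
      simp only [decide_eq_true_eq]
      rw [if_pos (hmem_iff.mpr ⟨hl, hx⟩)]
      push_cast
      omega
    · have hnx : x ∉ tb := fun hx => hcase (hmem_iff.mp hx)
      have hstep : (if h : i' < tb.length then
            (if tb[i'] = x then (i', acc + 1) else (i', acc))
          else (i', acc)) = (i', acc) := by
        by_cases hl : i' < tb.length
        · rw [dif_pos hl, if_neg (fun hx => hcase ⟨hl, hx⟩)]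
        · rw [dif_neg hl]
      rw [hstep]
      rw [ih hrest i' acc hs2 hrinv]
      rw [List.countP_cons]
      simp only [decide_eq_true_eq]
      rw [if_neg hnx]
      omega

-- pinned-instance restatements of the sortedness facts for pvSortId
theorem pvSortId_perm (xs : List (List Char)) : (pvSortId xs).Perm xs :=
  @PySem.List.sorted_perm _ _ List.instLinearOrder.toLT LinearOrder.toDecidableLT xs (fun x => x) false

theorem pvSortId_pairwise (xs : List (List Char)) : (pvSortId xs).Pairwise (fun a b => ¬ b < a) := by
  have h := @PySem.List.sorted_pairwise _ _ _ xs (fun x => x)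
  exact h.imp (fun {a b} hab => not_lt.mpr hab)

-- concatenating two adjacent slices gives the single slice
theorem slice_concat (s : List Char) (a b c : Int) (h0 : 0 ≤ a) (hab : a ≤ b) (hbc : b ≤ c) :
    PySem.List.slice s (some a) (some b) ++ PySem.List.slice s (some b) (some c)
      = PySem.List.slice s (some a) (some c) := by
  rw [PySem.List.slice_toNat _ h0 (by omega), PySem.List.slice_toNat _ (by omega) (by omega),
      PySem.List.slice_toNat _ h0 (by omega)]
  have hsum : c.toNat - a.toNat = (b.toNat - a.toNat) + (c.toNat - b.toNat) := by omega
  rw [hsum, List.take_add]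
  have hd : (s.drop a.toNat).drop (b.toNat - a.toNat) = s.drop b.toNat := by
    rw [List.drop_drop]
    congr 1
    omega
  rw [hd]

-- B's single-slice bigrams coincide with A's concatenated-block bigrams
theorem pvBigrams_eq (s : List Char) (n : Int) :
    pvBigrams s n = pvSortId ((PySem.List.pyRange 0 (max (PySem.Int.floordiv ((s.length : Int)) n - 1) 0) 1).map (pvBig s n)) := by
  simp only [pvBigrams]
  congr 1
  apply List.map_congr_left
  intro i hi
  rw [PySem.List.mem_pyRange_one] at hi
  obtain ⟨h0i, hiM⟩ := hi
  set T := PySem.Int.floordiv ((s.length : Int)) n with hT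
  have hT2 : 2 ≤ T := by omega
  have hn1 : 1 ≤ n := by
    by_contra h
    have : T ≤ 0 := by
      rw [hT]
      exact Int.fdiv_nonpos_of_nonneg_of_nonpos (by positivity) (by omega)
    omega
  rw [pvBig, slice_concat s (i * n) ((i + 1) * n) ((i + 2) * n) (by positivity)
        (mul_le_mul_of_nonneg_right (by omega) (by omega))
        (mul_le_mul_of_nonneg_right (by omega) (by omega))]

-- B equals the same closed form
theorem ngram_alt_eq_closed (typeWord compareWord : String) (n : Int) :
    ngram_alt typeWord compareWord n =
      (((PySem.List.pyRange 0 (max (PySem.Int.floordiv ((compareWord.toList.length : Int)) n - 1) 0) 1).map (pvBig compareWord.toList n)).length : Int)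
      + (((PySem.List.pyRange 0 (max (PySem.Int.floordiv ((typeWord.toList.length : Int)) n - 1) 0) 1).map (pvBig typeWord.toList n)).length : Int)
      - 2 * (((PySem.List.pyRange 0 (max (PySem.Int.floordiv ((compareWord.toList.length : Int)) n - 1) 0) 1).map (pvBig compareWord.toList n)).countP
          (fun x => decide (x ∈ (PySem.List.pyRange 0 (max (PySem.Int.floordiv ((typeWord.toList.length : Int)) n - 1) 0) 1).map (pvBig typeWord.toList n))) : Nat) := by
  simp only [ngram_alt]
  rw [pvBigrams_eq typeWord.toList n, pvBigrams_eq compareWord.toList n]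
  set TB := (PySem.List.pyRange 0 (max (PySem.Int.floordiv ((typeWord.toList.length : Int)) n - 1) 0) 1).map (pvBig typeWord.toList n) with hTB
  set CB := (PySem.List.pyRange 0 (max (PySem.Int.floordiv ((compareWord.toList.length : Int)) n - 1) 0) 1).map (pvBig compareWord.toList n) with hCB
  have hfold := merge_fold_count (pvSortId TB) (pvSortId_pairwise TB) (pvSortId CB)
      ((pvSortId_pairwise CB)) 0 0 (Nat.zero_le _) (fun j hj hj0 => absurd hj0 (by omega))
  rw [hfold, zero_add]
  have hlen1 : (pvSortId CB).length = CB.length := (pvSortId_perm CB).length_eq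
  have hlen2 : (pvSortId TB).length = TB.length := (pvSortId_perm TB).length_eq
  have hcnt : (pvSortId CB).countP (fun x => decide (x ∈ pvSortId TB))
      = CB.countP (fun x => decide (x ∈ TB)) := by
    rw [(pvSortId_perm CB).countP_eq]
    apply List.countP_congr
    intro x _
    simp only [decide_eq_true_eq]
    exact (pvSortId_perm TB).mem_iff
  rw [hlen1, hlen2, hcnt]

-- ===== VERDICT (by name: the statement is the Claim_ definition above) =====
theorem ngram_spec : Claim_equal_ngram := by
  intro t c n _ hn
  unfold Spec_ngram
  rw [ngram_eq_closed t c n hn, ngram_alt_eq_closed t c n]
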